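-- pv_equiv track=rewrite | github.com/jackreichelt/aoc2021 | day15/day15.py | bigify
-- ===== SOURCE A (Python) =====
-- def bigify(densityMap):
-- 	maxIndex = len(densityMap)
--
-- 	bigMap = []
-- 	for yTile in range(5):
-- 		for y in range(maxIndex):
-- 			bigMap.append([])
-- 			for xTile in range(5):
-- 				for x in range(maxIndex):
-- 					newRisk = densityMap[y][x]+xTile+yTile
-- 					if newRisk > 9:
-- 						newRisk = newRisk % 10 + 1
-- 					bigMap[yTile*maxIndex + y].append(newRisk)
-- 	return bigMap
-- ===== SOURCE B (Python) =====
-- def bigify(densityMap):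
-- 	n = len(densityMap)
-- 	base = [row[:n] for row in densityMap]
-- 	shifted = [[[v + off if v + off <= 9 else (v + off) % 10 + 1 for v in row]
-- 	            for row in base] for off in range(9)]
-- 	big = []
-- 	for yTile in range(5):
-- 		for y in range(n):
-- 			row = []
-- 			for off in range(yTile, yTile + 5):
-- 				row += shifted[off][y]
-- 			big.append(row)
-- 	return big
-- ===== Notes on version B (the rewrite author's own statement) =====
-- stated objective: faster
-- what changed: Instead of recomputing base+xTile+yTile per cell in 4 nested loops with indexed appends, B precomputes the 9 possible offset-shifted copies of the base grid once and assembles each output row by concatenating whole shifted rows; Pre_ excludes only the ragged grids on which A raises IndexError.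
import Mathlib
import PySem

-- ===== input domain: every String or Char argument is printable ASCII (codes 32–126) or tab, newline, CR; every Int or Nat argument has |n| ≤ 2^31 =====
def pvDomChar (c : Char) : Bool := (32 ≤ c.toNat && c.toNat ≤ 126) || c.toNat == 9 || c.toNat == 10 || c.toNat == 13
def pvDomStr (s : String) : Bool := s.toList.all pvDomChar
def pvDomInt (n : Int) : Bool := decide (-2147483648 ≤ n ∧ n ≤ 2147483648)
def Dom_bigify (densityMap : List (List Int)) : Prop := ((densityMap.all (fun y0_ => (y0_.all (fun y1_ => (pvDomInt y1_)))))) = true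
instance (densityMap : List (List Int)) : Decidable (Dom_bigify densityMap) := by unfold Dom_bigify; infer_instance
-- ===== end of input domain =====

-- B precomputes the 9 offset-shifted copies of the base grid once and assembles the output
-- by concatenating whole shifted rows, instead of A's per-cell offset formula in 4 nested loops.

-- ===== PORT A =====
-- bigMap[yTile*maxIndex + y].append(newRisk): append v to the row at index i (index always in range in A's run)
def pvAppendAt (l : List (List Int)) (i : Int) (v : Int) : List (List Int) :=
  PySem.List.pySetD l i ((PySem.List.pyGetD l i []) ++ [v])

def bigify (densityMap : List (List Int)) : List (List Int) :=
  let maxIndex : Int := densityMap.length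
  (PySem.List.pyRange 0 5 1).foldl (fun bigMap yTile =>
    (PySem.List.pyRange 0 maxIndex 1).foldl (fun bigMap y =>
      let bigMap := bigMap ++ [[]]
      (PySem.List.pyRange 0 5 1).foldl (fun bigMap xTile =>
        (PySem.List.pyRange 0 maxIndex 1).foldl (fun bigMap x =>
          let newRisk := PySem.List.pyGetD (PySem.List.pyGetD densityMap y []) x 0 + xTile + yTile
          let newRisk := if newRisk > 9 then PySem.Int.mod newRisk 10 + 1 else newRisk
          pvAppendAt bigMap (yTile * maxIndex + y) newRisk) bigMap) bigMap) bigMap) []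

-- ===== PORT B =====
def bigify_alt (densityMap : List (List Int)) : List (List Int) :=
  let n : Int := densityMap.length
  let base := densityMap.map (fun row => PySem.List.slice row none (some n))
  let shifted := (PySem.List.pyRange 0 9 1).map (fun off =>
    base.map (fun row => row.map (fun v =>
      if v + off ≤ 9 then v + off else PySem.Int.mod (v + off) 10 + 1)))
  (PySem.List.pyRange 0 5 1).foldl (fun big yTile =>
    (PySem.List.pyRange 0 n 1).foldl (fun big y =>
      let row := (PySem.List.pyRange yTile (yTile + 5) 1).foldl (fun row off =>
        row ++ PySem.List.pyGetD (PySem.List.pyGetD shifted off []) y []) []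
      big ++ [row]) big) []

-- ===== PRECONDITION & SPEC =====
-- Pre_ excludes exactly the ragged grids on which A raises IndexError
-- (densityMap[y][x] with x running up to len(densityMap)-1 and row y shorter than that).
def Pre_bigify (densityMap : List (List Int)) : Prop :=
  ∀ row ∈ densityMap, densityMap.length ≤ row.length
instance (densityMap : List (List Int)) : Decidable (Pre_bigify densityMap) := by unfold Pre_bigify; infer_instance

def pvWitness_bigify : List (List Int) := [[1, 2], [8, 9]]

def Spec_bigify (densityMap : List (List Int)) (out : List (List Int)) : Prop := out = bigify_alt densityMap
instance (densityMap : List (List Int)) (out : List (List Int)) : Decidable (Spec_bigify densityMap out) := by unfold Spec_bigify; infer_instance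

-- ===== CLAIM (what is proved, stated in full; the proofs are below) =====
def Claim_equal_bigify : Prop := ∀ (densityMap : List (List Int)), Dom_bigify densityMap → Pre_bigify densityMap → Spec_bigify densityMap (bigify densityMap)

-- ===== LEMMAS AND PROOFS =====
def pvWrap (w : Int) : Int := if w > 9 then PySem.Int.mod w 10 + 1 else w

def pvRowA (dm : List (List Int)) (yT y : Int) : List Int :=
  (PySem.List.pyRange 0 5 1).flatMap (fun xT =>
    (PySem.List.pyRange 0 (dm.length : Int) 1).map (fun x =>
      pvWrap (PySem.List.pyGetD (PySem.List.pyGetD dm y []) x 0 + xT + yT)))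

lemma appendAt_last (b : List (List Int)) (r : List Int) (v : Int) :
    pvAppendAt (b ++ [r]) (b.length : Int) v = b ++ [r ++ [v]] := by
  unfold pvAppendAt
  simp [PySem.List.pyGetD_natCast, PySem.List.pySetD_natCast, List.getD]

lemma foldl_appendAt (xs : List Int) (f : Int → Int) (b : List (List Int)) (r : List Int)
    (i : Int) (hi : i = (b.length : Int)) :
    xs.foldl (fun bm x => pvAppendAt bm i (f x)) (b ++ [r]) = b ++ [r ++ xs.map f] := by
  induction xs generalizing r with
  | nil => simp
  | cons x t ih =>
    simp only [List.foldl_cons, List.map_cons]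
    rw [hi, appendAt_last, ← hi, ih (r ++ [f x])]
    simp

lemma foldl_foldl_appendAt (ts : List Int) (xs : List Int) (f : Int → Int → Int)
    (b : List (List Int)) (r : List Int) (i : Int) (hi : i = (b.length : Int)) :
    ts.foldl (fun bm t => xs.foldl (fun bm x => pvAppendAt bm i (f t x)) bm) (b ++ [r])
      = b ++ [r ++ ts.flatMap (fun t => xs.map (f t))] := by
  induction ts generalizing r with
  | nil => simp
  | cons t ts ih =>
    simp only [List.foldl_cons, List.flatMap_cons]
    rw [foldl_appendAt _ _ b r i hi, ih (r ++ (xs.map (f t))) ]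
    simp

def pvShifted (dm : List (List Int)) : List (List (List Int)) :=
  (PySem.List.pyRange 0 9 1).map (fun off =>
    (dm.map (fun row => PySem.List.slice row none (some (dm.length : Int)))).map
      (fun row => row.map (fun v =>
        if v + off ≤ 9 then v + off else PySem.Int.mod (v + off) 10 + 1)))

def pvRowB (dm : List (List Int)) (yT y : Int) : List Int :=
  (PySem.List.pyRange yT (yT + 5) 1).flatMap (fun off =>
    PySem.List.pyGetD (PySem.List.pyGetD (pvShifted dm) off []) y [])

lemma bigifyB_eq (dm : List (List Int)) :
    bigify_alt dm = (PySem.List.pyRange 0 5 1).flatMap (fun yT =>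
      (PySem.List.pyRange 0 (dm.length : Int) 1).map (fun y => pvRowB dm yT y)) := by
  simp only [bigify_alt, pvRowB, pvShifted, PySem.List.foldl_append_eq_flatMap,
    List.nil_append, ← List.map_eq_flatMap]

lemma foldl_y (dm : List (List Int)) (yT : Int) :
    ∀ (k : Nat) (c : Int) (b : List (List Int)), 0 ≤ c →
      ((dm.length : Int) - c).toNat = k →
      (b.length : Int) = yT * (dm.length : Int) + c →
      (PySem.List.pyRange c (dm.length : Int) 1).foldl (fun bigMap y =>
        (PySem.List.pyRange 0 5 1).foldl (fun bigMap xTile =>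
          (PySem.List.pyRange 0 (dm.length : Int) 1).foldl (fun bigMap x =>
            pvAppendAt bigMap (yT * (dm.length : Int) + y)
              (pvWrap (PySem.List.pyGetD (PySem.List.pyGetD dm y []) x 0 + xTile + yT)))
            bigMap) (bigMap ++ [[]])) b
      = b ++ (PySem.List.pyRange c (dm.length : Int) 1).map (fun y => pvRowA dm yT y) := by
  intro k
  induction k with
  | zero =>
    intro c b hc hk hb
    have h0 : PySem.List.pyRange c (dm.length : Int) 1 = [] :=
      PySem.List.pyRange_one_eq_nil (by omega)
    rw [h0]; simp
  | succ k ih =>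
    intro c b hc hk hb
    have h1 : PySem.List.pyRange c (dm.length : Int) 1 = c :: PySem.List.pyRange (c+1) (dm.length : Int) 1 :=
      PySem.List.pyRange_one_cons (by omega)
    rw [h1, List.foldl_cons, List.map_cons]
    rw [foldl_foldl_appendAt (PySem.List.pyRange 0 5 1) (PySem.List.pyRange 0 (dm.length:Int) 1)
        (fun t x => pvWrap (PySem.List.pyGetD (PySem.List.pyGetD dm c []) x 0 + t + yT))
        b [] (yT * (dm.length:Int) + c) hb.symm]
    rw [ih (c+1) _ (by omega) (by omega) (by simp; omega)]
    simp [pvRowA]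

lemma bigifyA_eq (dm : List (List Int)) :
    bigify dm = (PySem.List.pyRange 0 5 1).flatMap (fun yT =>
      (PySem.List.pyRange 0 (dm.length : Int) 1).map (fun y => pvRowA dm yT y)) := by
  have houter : ∀ (k : Nat) (t : Int) (b : List (List Int)), 0 ≤ t → (5 - t).toNat = k →
      (b.length : Int) = t * (dm.length : Int) →
      (PySem.List.pyRange t 5 1).foldl (fun bigMap yTile =>
        (PySem.List.pyRange 0 (dm.length : Int) 1).foldl (fun bigMap y =>
          (PySem.List.pyRange 0 5 1).foldl (fun bigMap xTile =>
            (PySem.List.pyRange 0 (dm.length : Int) 1).foldl (fun bigMap x =>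
              pvAppendAt bigMap (yTile * (dm.length : Int) + y)
                (pvWrap (PySem.List.pyGetD (PySem.List.pyGetD dm y []) x 0 + xTile + yTile)))
              bigMap) (bigMap ++ [[]])) bigMap) b
      = b ++ (PySem.List.pyRange t 5 1).flatMap (fun yT =>
          (PySem.List.pyRange 0 (dm.length : Int) 1).map (fun y => pvRowA dm yT y)) := by
    intro k
    induction k with
    | zero =>
      intro t b ht hk hb
      have h0 : PySem.List.pyRange t 5 1 = [] := PySem.List.pyRange_one_eq_nil (by omega)
      rw [h0]; simp
    | succ k ih =>
      intro t b ht hk hb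
      have h1 : PySem.List.pyRange t 5 1 = t :: PySem.List.pyRange (t+1) 5 1 :=
        PySem.List.pyRange_one_cons (by omega)
      rw [h1, List.foldl_cons, List.flatMap_cons]
      rw [foldl_y dm t ((dm.length : Int) - 0).toNat 0 b (by omega) rfl (by omega)]
      have hr : (t + 1) * (dm.length : Int) = t * (dm.length : Int) + (dm.length : Int) := by ring
      rw [ih (t+1) _ (by omega) (by omega)
          (by simp [PySem.List.length_pyRange_one]; omega)]
      simp
  have h := houter 5 0 [] (by norm_num) (by decide) (by simp)
  rw [List.nil_append] at h
  exact h

lemma row_eq (dm : List (List Int)) (hpre : Pre_bigify dm) (yT y : Int)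
    (hyT0 : 0 ≤ yT) (hyT5 : yT < 5) (hy0 : 0 ≤ y) (hyn : y < (dm.length : Int)) :
    pvRowA dm yT y = pvRowB dm yT y := by
  unfold pvRowA pvRowB pvShifted
  rw [PySem.List.pyRange_one yT (yT + 5), PySem.List.pyRange_one 0 5]
  simp only [List.flatMap_map]
  have h5 : ((5 : Int) - 0).toNat = 5 := by decide
  have h5' : ((yT + 5) - yT).toNat = 5 := by omega
  rw [h5, h5']
  refine List.flatMap_congr ?_
  intro k hk
  have hk5 : k < 5 := List.mem_range.mp hk
  -- RHS: resolve shifted[yT+k], then [y]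
  rw [PySem.List.pyGetD_map_pyRange_of_nonneg _ 9 (yT + (k : Int)) [] (by omega) (by omega)]
  rw [PySem.List.pyGetD_eq_getElem dm [] hy0 hyn]
  rw [PySem.List.pyGetD_eq_getElem _ [] hy0 (by simpa using hyn)]
  simp only [List.getElem_map]
  rw [PySem.List.slice_to_natCast]
  have hmem : dm[y.toNat] ∈ dm := List.getElem_mem _
  have hrow : dm.length ≤ dm[y.toNat].length := hpre _ hmem
  rw [PySem.List.pyRange_zero_natCast dm.length, List.map_map]
  apply List.ext_getElem
  · simp; omega
  · intro i hi1 hi2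
    simp only [List.getElem_map, List.getElem_range, Function.comp_apply, List.getElem_take]
    have hiN : i < dm.length := by simpa using hi1
    have hget : PySem.List.pyGetD dm[y.toNat] ((i : Nat) : Int) 0 = dm[y.toNat][i]'(by omega) := by
      rw [PySem.List.pyGetD_natCast, List.getD_eq_getElem _ _ (by omega)]
    rw [hget]
    unfold pvWrap
    have harg : dm[y.toNat][i]'(by omega) + (0 + (k : Int)) + yT
        = dm[y.toNat][i]'(by omega) + (yT + (k : Int)) := by ring
    rw [harg]
    split_ifs <;> first | rfl | omega

-- ===== VERDICT (by name: the statement is the Claim_ definition above) =====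
theorem bigify_spec : Claim_equal_bigify := by
  intro dm _ hpre
  unfold Spec_bigify
  rw [bigifyA_eq, bigifyB_eq]
  refine List.flatMap_congr ?_
  intro yT hyT
  have hyT' := PySem.List.mem_pyRange_one.mp hyT
  refine List.map_congr_left ?_
  intro y hy
  have hy' := PySem.List.mem_pyRange_one.mp hy
  exact row_eq dm hpre yT y hyT'.1 hyT'.2 hy'.1 hy'.2
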